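-- pv_equiv track=rewrite | github.com/CEDBRASIL/SISTEMA-GERAL | cursos.py | obter_nomes_por_ids
-- ===== SOURCE A (Python) =====
-- from typing import Dict, List
--
-- CURSOS_OM: Dict[str, List[int]] = {
--     "Excel PRO": [161, 197, 201],
--     "Design Gráfico": [254, 751, 169],
--     "Analista e Desenvolvimento de Sistemas": [590, 176, 239, 203],
--     "Administração": [129, 198, 156, 154],
--     "Inglês Fluente": [263, 280, 281],
--     "Inglês Kids": [266],
--     "Informática Essencial": [130, 599, 161, 160, 162],
--     "Operador de Micro": [130, 599, 160, 161, 162, 163, 222],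
--     "Especialista em Marketing & Vendas 360º": [123, 199, 202, 236, 264, 441, 734, 780, 828, 829],
--     "Marketing Digital": [734, 236, 441, 199, 780],
--     "Pacote Office": [160, 161, 162, 197, 201],
--     "None": [129, 198, 156, 154],
-- }
--
-- def obter_nomes_por_ids(ids: List[int]) -> List[str]:
--     """Retorna os nomes de cursos correspondentes aos IDs fornecidos."""
--     if not ids:
--         return []
--
--     ids_set = set(ids)
--
--     # Verifica se existe algum curso com conjunto de IDs exatamente igual
--     nomes_exatos = [n for n, lista in CURSOS_OM.items() if set(lista) == ids_set]
--     if nomes_exatos: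
--         return nomes_exatos
--
--     # Caso contrário, inclui nomes de cursos que contenham qualquer um dos IDs
--     nomes: List[str] = []
--     for cid in ids:
--         for nome, lista in CURSOS_OM.items():
--             if cid in lista and nome not in nomes:
--                 nomes.append(nome)
--
--     return nomes
-- ===== SOURCE B (Python) =====
-- from typing import Dict, List
--
-- CURSOS_OM: Dict[str, List[int]] = {
--     "Excel PRO": [161, 197, 201],
--     "Design Gráfico": [254, 751, 169],
--     "Analista e Desenvolvimento de Sistemas": [590, 176, 239, 203],
--     "Administração": [129, 198, 156, 154],
--     "Inglês Fluente": [263, 280, 281],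
--     "Inglês Kids": [266],
--     "Informática Essencial": [130, 599, 161, 160, 162],
--     "Operador de Micro": [130, 599, 160, 161, 162, 163, 222],
--     "Especialista em Marketing & Vendas 360º": [123, 199, 202, 236, 264, 441, 734, 780, 828, 829],
--     "Marketing Digital": [734, 236, 441, 199, 780],
--     "Pacote Office": [160, 161, 162, 197, 201],
--     "None": [129, 198, 156, 154],
-- }
--
-- # Precomputed once at import time:
-- #  _EXACT maps each distinct ID-set to the names having exactly that set (dict order),
-- #  _INDEX maps each single ID to the names whose list contains it (dict order).
-- _EXACT: Dict[frozenset, List[str]] = {}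
-- _INDEX: Dict[int, List[str]] = {}
-- for _n, _l in CURSOS_OM.items():
--     _EXACT.setdefault(frozenset(_l), []).append(_n)
--     for _c in _l:
--         _INDEX.setdefault(_c, []).append(_n)
--
--
-- def obter_nomes_por_ids(ids: List[int]) -> List[str]:
--     """Retorna os nomes de cursos correspondentes aos IDs fornecidos."""
--     if not ids:
--         return []
--
--     exatos = _EXACT.get(frozenset(ids), [])
--     if exatos:
--         return list(exatos)
--
--     nomes: List[str] = []
--     for cid in ids:
--         for nome in _INDEX.get(cid, []):
--             if nome not in nomes:
--                 nomes.append(nome)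
--     return nomes
-- ===== Notes on version B (the rewrite author's own statement) =====
-- stated objective: faster
-- what changed: B precomputes two indexes from CURSOS_OM once at import time - a frozenset-keyed dict for the exact-match phase and an inverted ID->names index for the contains phase - so each query does dict lookups instead of rescanning CURSOS_OM per id.
import Mathlib
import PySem

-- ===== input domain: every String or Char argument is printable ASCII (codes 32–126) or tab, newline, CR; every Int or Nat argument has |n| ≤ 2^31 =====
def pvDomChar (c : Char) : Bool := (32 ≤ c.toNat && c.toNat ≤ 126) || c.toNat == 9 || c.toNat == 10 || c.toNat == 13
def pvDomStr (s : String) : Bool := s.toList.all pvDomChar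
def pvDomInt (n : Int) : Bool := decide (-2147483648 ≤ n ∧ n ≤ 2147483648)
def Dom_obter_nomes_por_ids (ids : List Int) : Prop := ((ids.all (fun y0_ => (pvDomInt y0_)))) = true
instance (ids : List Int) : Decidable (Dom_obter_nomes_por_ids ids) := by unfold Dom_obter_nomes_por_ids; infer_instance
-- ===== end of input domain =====

-- B replaces A's per-query scans of CURSOS_OM by two indexes precomputed once
-- (ID-set -> names for the exact-match phase, single ID -> names for the contains
-- phase); equivalence of the RETURN value is proved for all inputs.

-- shared module constant CURSOS_OM (data, used by both ports)
def pvCursosOM : List (String × List Int) := [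
  ("Excel PRO", [161, 197, 201]),
  ("Design Gráfico", [254, 751, 169]),
  ("Analista e Desenvolvimento de Sistemas", [590, 176, 239, 203]),
  ("Administração", [129, 198, 156, 154]),
  ("Inglês Fluente", [263, 280, 281]),
  ("Inglês Kids", [266]),
  ("Informática Essencial", [130, 599, 161, 160, 162]),
  ("Operador de Micro", [130, 599, 160, 161, 162, 163, 222]),
  ("Especialista em Marketing & Vendas 360º", [123, 199, 202, 236, 264, 441, 734, 780, 828, 829]),
  ("Marketing Digital", [734, 236, 441, 199, 780]),
  ("Pacote Office", [160, 161, 162, 197, 201]),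
  ("None", [129, 198, 156, 154])]

-- ===== PORT A =====
def obter_nomes_por_ids (ids : List Int) : List String :=
  if ids = [] then []
  else
    let ids_set := PySem.Set.ofList ids
    -- [n for n, lista in CURSOS_OM.items() if set(lista) == ids_set]
    let nomes_exatos := (pvCursosOM.filter
      (fun p => PySem.Set.equal (PySem.Set.ofList p.2) ids_set)).map Prod.fst
    if nomes_exatos ≠ [] then nomes_exatos
    else
      ids.foldl (fun nomes cid =>
        pvCursosOM.foldl (fun nomes p =>
          if cid ∈ p.2 ∧ p.1 ∉ nomes then nomes ++ [p.1] else nomes) nomes) []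

-- ===== PORT B =====
-- hand-rolled model of a Python dict keyed by frozensets: lookup/insert compare
-- keys by set equality (PySem.Set.equal), insertion order preserved, appends in
-- place — exact for _EXACT, which is only built with setdefault(...).append and
-- read with .get.
def pvExGet (d : List (List Int × List String)) (k : List Int) : List String :=
  match d with
  | [] => []
  | (k', v) :: rest => if PySem.Set.equal k' k then v else pvExGet rest k

def pvExAdd (d : List (List Int × List String)) (k : List Int) (n : String) :
    List (List Int × List String) :=
  match d with
  | [] => [(k, [n])]
  | (k', v) :: rest =>
      if PySem.Set.equal k' k then (k', v ++ [n]) :: rest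
      else (k', v) :: pvExAdd rest k n

-- _EXACT : built once from CURSOS_OM
def pvExact : List (List Int × List String) :=
  pvCursosOM.foldl (fun d p => pvExAdd d (PySem.Set.ofList p.2) p.1) []

-- _INDEX : built once from CURSOS_OM (setdefault(c, []).append(n) = modify c [] (· ++ [n]))
def pvIndex : PySem.Dict Int (List String) :=
  pvCursosOM.foldl (fun d p =>
    p.2.foldl (fun d c => d.modify c [] (· ++ [p.1])) d) PySem.Dict.empty

def obter_nomes_por_ids_alt (ids : List Int) : List String :=
  if ids = [] then []
  else
    let exatos := pvExGet pvExact (PySem.Set.ofList ids)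
    if exatos ≠ [] then exatos
    else
      ids.foldl (fun nomes cid =>
        (pvIndex.getD cid []).foldl (fun nomes nome =>
          if nome ∉ nomes then nomes ++ [nome] else nomes) nomes) []

-- ===== PRECONDITION & SPEC =====
def Spec_obter_nomes_por_ids (ids : List Int) (out : List String) : Prop := out = obter_nomes_por_ids_alt ids
instance (ids : List Int) (out : List String) : Decidable (Spec_obter_nomes_por_ids ids out) := by unfold Spec_obter_nomes_por_ids; infer_instance

-- ===== CLAIM (what is proved, stated in full; the proofs are below) =====
def Claim_equal_obter_nomes_por_ids : Prop := ∀ (ids : List Int), Dom_obter_nomes_por_ids ids → Spec_obter_nomes_por_ids ids (obter_nomes_por_ids ids)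

-- ===== LEMMAS AND PROOFS =====

theorem pvEqual_symm {k s : List Int} (h : PySem.Set.equal k s = true) :
    PySem.Set.equal s k = true := by
  rw [PySem.Set.equal_iff] at *
  exact fun x => (h x).symm

theorem pvEqual_trans {a b c : List Int} (h1 : PySem.Set.equal a b = true)
    (h2 : PySem.Set.equal b c = true) : PySem.Set.equal a c = true := by
  rw [PySem.Set.equal_iff] at *
  exact fun x => (h1 x).trans (h2 x)

theorem pvExGet_exAdd (d : List (List Int × List String)) (k : List Int) (n : String)
    (s : List Int) :
    pvExGet (pvExAdd d k n) s =
      pvExGet d s ++ (if PySem.Set.equal k s then [n] else []) := by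
  induction d with
  | nil =>
      simp only [pvExAdd, pvExGet]
      split <;> simp_all
  | cons hd tl ih =>
      obtain ⟨k', v⟩ := hd
      simp only [pvExAdd]
      by_cases hk : PySem.Set.equal k' k = true
      · simp only [hk, if_true]
        by_cases hs : PySem.Set.equal k' s = true
        · have : PySem.Set.equal k s = true := pvEqual_trans (pvEqual_symm hk) hs
          simp [pvExGet, hs, this]
        · have : PySem.Set.equal k s = false := by
            by_contra h
            exact hs (pvEqual_trans hk (by simpa using h))
          simp [pvExGet, hs, this]
      · simp only [hk]
        by_cases hs : PySem.Set.equal k' s = true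
        · have : PySem.Set.equal k s = false := by
            by_contra h
            exact hk (pvEqual_trans hs (pvEqual_symm (by simpa using h)))
          simp [pvExGet, hs, this]
        · simp [pvExGet, hs, ih]

theorem pvExGet_fold (t : List (String × List Int)) (d : List (List Int × List String))
    (s : List Int) :
    pvExGet (t.foldl (fun d p => pvExAdd d (PySem.Set.ofList p.2) p.1) d) s =
      pvExGet d s ++
        (t.filter (fun p => PySem.Set.equal (PySem.Set.ofList p.2) s)).map Prod.fst := by
  induction t generalizing d with
  | nil => simp
  | cons hd tl ih =>
      simp only [List.foldl_cons, List.filter_cons]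
      rw [ih, pvExGet_exAdd]
      by_cases h : PySem.Set.equal (PySem.Set.ofList hd.2) s = true <;> simp [h]

theorem pvBucket_single (l : List Int) (n : String) (c : Int) (hnd : l.Nodup)
    (d : PySem.Dict Int (List String)) :
    (l.foldl (fun d c' => d.modify c' [] (· ++ [n])) d).getD c [] =
      d.getD c [] ++ (if c ∈ l then [n] else []) := by
  induction l generalizing d with
  | nil => simp
  | cons x xs ih =>
      simp only [List.foldl_cons]
      rw [ih (by simp_all [List.nodup_cons])]
      rw [PySem.Dict.getD_modify]
      by_cases hx : c = x
      · subst hx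
        have : c ∉ xs := by simp [List.nodup_cons] at hnd; exact hnd.1
        simp [this]
      · simp [hx, List.mem_cons]

theorem pvBucket_fold (t : List (String × List Int)) (h : ∀ p ∈ t, p.2.Nodup)
    (d : PySem.Dict Int (List String)) (c : Int) :
    (t.foldl (fun d p => p.2.foldl (fun d c' => d.modify c' [] (· ++ [p.1])) d) d).getD c [] =
      d.getD c [] ++ (t.filter (fun p => decide (c ∈ p.2))).map Prod.fst := by
  induction t generalizing d with
  | nil => simp
  | cons hd tl ih =>
      simp only [List.foldl_cons, List.filter_cons]
      rw [ih (fun p hp => h p (List.mem_cons_of_mem _ hp)),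
          pvBucket_single _ _ _ (h hd (List.mem_cons_self)) ]
      by_cases hc : c ∈ hd.2 <;> simp [hc]

theorem pvInner_eq (t : List (String × List Int)) (c : Int) (nomes : List String) :
    t.foldl (fun nomes p =>
        if c ∈ p.2 ∧ p.1 ∉ nomes then nomes ++ [p.1] else nomes) nomes =
      ((t.filter (fun p => decide (c ∈ p.2))).map Prod.fst).foldl
        (fun nomes nome => if nome ∉ nomes then nomes ++ [nome] else nomes) nomes := by
  induction t generalizing nomes with
  | nil => simp
  | cons hd tl ih =>
      simp only [List.foldl_cons, List.filter_cons]
      by_cases hc : c ∈ hd.2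
      · simp only [hc, decide_true, if_true, List.map_cons, List.foldl_cons, true_and]
        rw [ih]
      · simp only [hc, decide_false, Bool.false_eq_true, if_false, false_and]
        rw [ih]

theorem pvNodup_table : ∀ p ∈ pvCursosOM, p.2.Nodup := by decide

-- ===== VERDICT (by name: the statement is the Claim_ definition above) =====
theorem obter_nomes_por_ids_spec : Claim_equal_obter_nomes_por_ids := by
  intro ids _
  unfold Spec_obter_nomes_por_ids obter_nomes_por_ids obter_nomes_por_ids_alt
  by_cases hnil : ids = []
  · simp [hnil]
  · simp only [hnil, if_false]
    have hex : pvExGet pvExact (PySem.Set.ofList ids) =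
        (pvCursosOM.filter
          (fun p => PySem.Set.equal (PySem.Set.ofList p.2) (PySem.Set.ofList ids))).map
          Prod.fst := by
      unfold pvExact
      rw [pvExGet_fold]
      simp [pvExGet]
    rw [hex]
    by_cases he : (pvCursosOM.filter
        (fun p => PySem.Set.equal (PySem.Set.ofList p.2) (PySem.Set.ofList ids))).map
        Prod.fst = []
    · simp only [he, ne_eq, not_true_eq_false, if_false]
      have hstep : (fun (nomes : List String) (cid : Int) =>
          pvCursosOM.foldl (fun nomes p =>
            if cid ∈ p.2 ∧ p.1 ∉ nomes then nomes ++ [p.1] else nomes) nomes) =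
          (fun (nomes : List String) (cid : Int) =>
          (pvIndex.getD cid []).foldl
            (fun nomes nome => if nome ∉ nomes then nomes ++ [nome] else nomes) nomes) := by
        funext nomes cid
        have hb : pvIndex.getD cid [] =
            (pvCursosOM.filter (fun p => decide (cid ∈ p.2))).map Prod.fst := by
          unfold pvIndex
          rw [pvBucket_fold _ pvNodup_table]
          simp
        rw [hb, pvInner_eq]
      rw [hstep]
    · simp only [he, ne_eq, not_false_eq_true, if_true]
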